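-- pv_equiv track=rewrite | github.com/HansHabraken/adventofcode-2022 | day1/main.py | calculate_calls_per_elf
-- ===== SOURCE A (Python) =====
-- def calculate_calls_per_elf(input):
--     processed_list = []
--     cal_per_elf = []
--     for cal in input:
--         if cal != "":
--             cal_per_elf.append(int(cal))
--             continue
--         processed_list.append(cal_per_elf)
--         cal_per_elf = []
--
--     return processed_list
-- ===== SOURCE B (Python) =====
-- def split_on_blank(input):
--     if "" not in input:
--         return [input]
--     i = input.index("")
--     return [input[:i]] + split_on_blank(input[i + 1:])
--
--
-- def calculate_calls_per_elf(input):
--     segments = split_on_blank(input)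
--     return [[int(s) for s in seg] for seg in segments][:-1]
-- ===== Notes on version B (the rewrite author's own statement) =====
-- stated objective: alternative
-- what changed: Replaces A's single-pass accumulate-and-reset loop with a split-then-parse decomposition: recursively cut the list at the first "" separator into string segments, parse every segment with a mapped int(), and drop the trailing post-separator segment with [:-1].
import Mathlib
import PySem

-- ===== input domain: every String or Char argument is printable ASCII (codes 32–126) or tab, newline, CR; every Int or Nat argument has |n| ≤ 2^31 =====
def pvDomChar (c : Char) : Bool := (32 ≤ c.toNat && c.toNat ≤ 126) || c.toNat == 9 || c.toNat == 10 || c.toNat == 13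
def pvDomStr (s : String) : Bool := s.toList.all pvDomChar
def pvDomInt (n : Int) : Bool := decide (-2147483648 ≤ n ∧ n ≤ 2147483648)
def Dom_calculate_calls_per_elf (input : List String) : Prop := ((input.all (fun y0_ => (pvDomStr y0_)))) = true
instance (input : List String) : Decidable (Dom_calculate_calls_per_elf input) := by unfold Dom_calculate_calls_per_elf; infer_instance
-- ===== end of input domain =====

-- B replaces A's accumulate-and-reset single pass by a split-at-first-separator-then-parse decomposition; equal return value on all inputs where A returns (Pre_ excludes the ValueError inputs).


-- int(s); Pre_ guarantees isSome on every non-"" element, so getD 0 is never reached inside Pre_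
def pvInt (s : String) : Int := (PySem.Int.ofStr? s).getD 0

-- ===== PORT A =====
-- single pass: (processed_list, cal_per_elf) accumulator
def calculate_calls_per_elf (input : List String) : List (List Int) :=
  (input.foldl
    (fun (st : List (List Int) × List Int) cal =>
      if cal ≠ "" then (st.1, st.2 ++ [pvInt cal])
      else (st.1 ++ [st.2], []))
    ([], [])).1

-- ===== PORT B =====
-- split_on_blank: recursion on the first "" separator, keeping the trailing segment
def pvSplitOnBlank (input : List String) : List (List String) :=
  match h : PySem.List.index? input "" with
  | none => [input]
  | some i => input.take i :: pvSplitOnBlank (input.drop (i + 1))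
termination_by input.length
decreasing_by
  have hs : (PySem.List.index? input "").isSome := by rw [h]; rfl
  have hm : "" ∈ input := (PySem.List.index?_isSome_iff input "").mp hs
  have hp : 0 < input.length := List.length_pos_of_mem hm
  simp only [List.length_drop]
  omega

-- parse every segment, then drop the trailing one ([:-1])
def calculate_calls_per_elf_alt (input : List String) : List (List Int) :=
  ((pvSplitOnBlank input).map (fun seg => seg.map pvInt)).dropLast

-- ===== PRECONDITION & SPEC =====
-- Pre_ excludes exactly the inputs on which A raises ValueError: some non-empty element is not a valid int literal
def Pre_calculate_calls_per_elf (input : List String) : Prop :=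
  ∀ s ∈ input, s ≠ "" → (PySem.Int.ofStr? s).isSome = true
instance (input : List String) : Decidable (Pre_calculate_calls_per_elf input) := by unfold Pre_calculate_calls_per_elf; infer_instance
def pvWitness_calculate_calls_per_elf : List String := ["1", "2", "", "30", ""]

def Spec_calculate_calls_per_elf (input : List String) (out : List (List Int)) : Prop := out = calculate_calls_per_elf_alt input
instance (input : List String) (out : List (List Int)) : Decidable (Spec_calculate_calls_per_elf input out) := by unfold Spec_calculate_calls_per_elf; infer_instance

-- ===== CLAIM (what is proved, stated in full; the proofs are below) =====
def Claim_equal_calculate_calls_per_elf : Prop := ∀ (input : List String), Dom_calculate_calls_per_elf input → Pre_calculate_calls_per_elf input → Spec_calculate_calls_per_elf input (calculate_calls_per_elf input)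

-- ===== LEMMAS AND PROOFS =====

-- reference shape of A's loop result, starting from current group `cur`
def pvGroups (cur : List Int) : List String → List (List Int)
  | [] => []
  | x :: xs => if x = "" then cur :: pvGroups [] xs else pvGroups (cur ++ [pvInt x]) xs

theorem pvFold_eq_groups (input : List String) (acc : List (List Int)) (cur : List Int) :
    (input.foldl
      (fun (st : List (List Int) × List Int) cal =>
        if cal ≠ "" then (st.1, st.2 ++ [pvInt cal])
        else (st.1 ++ [st.2], []))
      (acc, cur)).1 = acc ++ pvGroups cur input := by
  induction input generalizing acc cur with
  | nil => simp [pvGroups]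
  | cons x xs ih =>
    rw [List.foldl_cons]
    by_cases hx : x = ""
    · rw [if_neg (by simp [hx])]
      rw [ih]; simp [pvGroups, hx]
    · rw [if_pos hx]
      rw [ih]; simp [pvGroups, hx]

theorem pvGroups_split (input : List String) (cur : List Int) :
    pvGroups cur input =
      match PySem.List.index? input "" with
      | none => []
      | some i => (cur ++ (input.take i).map pvInt) :: pvGroups [] (input.drop (i + 1)) := by
  induction input generalizing cur with
  | nil => simp [pvGroups, PySem.List.index?]
  | cons x xs ih =>
    by_cases hx : x = ""
    · subst hx
      rw [PySem.List.index?_cons_self]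
      simp [pvGroups]
    · rw [PySem.List.index?_cons_of_ne xs hx]
      simp only [pvGroups, hx]
      rw [ih (cur ++ [pvInt x])]
      cases h : PySem.List.index? xs "" with
      | none => simp
      | some i => simp [List.take_succ_cons]

theorem pvSplitOnBlank_ne_nil (input : List String) : pvSplitOnBlank input ≠ [] := by
  rw [pvSplitOnBlank.eq_def]
  cases h : PySem.List.index? input "" <;> simp

theorem pvAlt_eq_groups (input : List String) :
    calculate_calls_per_elf_alt input = pvGroups [] input := by
  unfold calculate_calls_per_elf_alt
  rw [pvGroups_split, pvSplitOnBlank.eq_def]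
  cases h : PySem.List.index? input "" with
  | none => simp
  | some i =>
    simp only [List.map_cons]
    rw [List.dropLast_cons_of_ne_nil (by simp [pvSplitOnBlank_ne_nil])]
    have ih := pvAlt_eq_groups (input.drop (i + 1))
    unfold calculate_calls_per_elf_alt at ih
    rw [ih]
    simp
termination_by input.length
decreasing_by
  have hs : (PySem.List.index? input "").isSome := by rw [h]; rfl
  have hm : "" ∈ input := (PySem.List.index?_isSome_iff input "").mp hs
  have hp : 0 < input.length := List.length_pos_of_mem hm
  simp only [List.length_drop]
  omega

-- ===== VERDICT (by name: the statement is the Claim_ definition above) =====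
theorem calculate_calls_per_elf_spec : Claim_equal_calculate_calls_per_elf := by
  intro input _ _
  unfold Spec_calculate_calls_per_elf calculate_calls_per_elf
  rw [pvFold_eq_groups, pvAlt_eq_groups]
  simp
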